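-- pv_equiv track=rewrite | github.com/yannickloth/W33-Theory | tools/w33_e8_explicit_bijection.py | build_triangle_graph_edges
-- ===== SOURCE A (Python) =====
-- def build_triangle_graph_edges(triangles, adj):
--     """Build the 240 edges of the triangle co-occurrence graph."""
--     n_tri = len(triangles)
--     tri_edges = []
--
--     for i, t1 in enumerate(triangles):
--         for j, t2 in enumerate(triangles[i + 1 :], i + 1):
--             # Triangles are adjacent if they share exactly one vertex
--             common = len(set(t1) & set(t2))
--             if common == 1:
--                 tri_edges.append((i, j))
--
--     return tri_edges
-- ===== SOURCE B (Python) =====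
-- def build_triangle_graph_edges(triangles, adj):
--     """Build the 240 edges of the triangle co-occurrence graph."""
--     # Inverted index: vertex -> indices of triangles containing it (ascending).
--     index = {}
--     for i, t in enumerate(triangles):
--         for v in set(t):
--             index.setdefault(v, []).append(i)
--     # For each vertex, every ordered pair of triangles sharing it gets one count;
--     # a pair shares exactly one vertex iff its total count is 1.
--     counts = {}
--     for tris in index.values():
--         for a, x in enumerate(tris):
--             for y in tris[a + 1:]:
--                 pair = (x, y)
--                 counts[pair] = counts.get(pair, 0) + 1
--     return sorted(pair for pair, c in counts.items() if c == 1)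
-- ===== Notes on version B (the rewrite author's own statement) =====
-- stated objective: faster
-- what changed: Replaces the all-pairs scan with set intersections by a vertex->triangles inverted index whose per-vertex co-occurrence counts are accumulated in a dict; pairs with total count 1 share exactly one vertex, and sorting them reproduces A's lexicographic order.
import Mathlib
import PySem

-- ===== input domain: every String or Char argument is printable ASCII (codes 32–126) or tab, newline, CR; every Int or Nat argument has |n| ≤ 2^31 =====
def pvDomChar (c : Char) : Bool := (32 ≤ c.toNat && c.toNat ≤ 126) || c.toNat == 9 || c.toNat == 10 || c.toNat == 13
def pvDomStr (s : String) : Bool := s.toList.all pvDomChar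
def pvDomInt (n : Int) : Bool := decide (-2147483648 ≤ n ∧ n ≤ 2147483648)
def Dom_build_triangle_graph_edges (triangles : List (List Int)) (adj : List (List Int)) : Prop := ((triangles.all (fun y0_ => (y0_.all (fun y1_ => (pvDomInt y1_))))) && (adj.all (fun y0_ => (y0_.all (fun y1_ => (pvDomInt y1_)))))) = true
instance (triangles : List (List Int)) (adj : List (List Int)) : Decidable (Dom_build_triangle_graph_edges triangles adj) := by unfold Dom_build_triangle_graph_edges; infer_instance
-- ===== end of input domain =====

-- B replaces A's all-pairs scan with a vertex->triangles inverted index plus a co-occurrence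
-- counter dict (pairs with total count 1 share exactly one vertex), sorted at the end; the
-- timing run measured B faster. 'adj' is unused by both, as in the original.

-- ===== PORT A =====
def build_triangle_graph_edges (triangles : List (List Int)) (adj : List (List Int)) : List (Int × Int) :=
  let _n_tri : Int := triangles.length   -- A's unused 'n_tri = len(triangles)'
  (PySem.List.enumerate triangles 0).foldl (fun tri_edges it =>
    (PySem.List.enumerate (PySem.List.slice triangles (some (it.1 + 1)) none) (it.1 + 1)).foldl
      (fun acc jt =>
        let common : Int := PySem.Set.len (PySem.Set.inter (PySem.Set.ofList it.2) (PySem.Set.ofList jt.2))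
        if common = 1 then acc ++ [(it.1, jt.1)] else acc)
      tri_edges)
    []

-- ===== PORT B =====
def build_triangle_graph_edges_alt (triangles : List (List Int)) (adj : List (List Int)) : List (Int × Int) :=
  -- index: vertex -> indices of triangles containing it
  let index : PySem.Dict Int (List Int) :=
    (PySem.List.enumerate triangles 0).foldl (fun d it =>
      (PySem.Set.ofList it.2).foldl (fun d v => d.modify v [] (fun l => l ++ [it.1])) d)
      PySem.Dict.empty
  -- counts: pair of triangle indices -> number of shared vertices
  let counts : PySem.Dict (Int × Int) Int :=
    index.values.foldl (fun c tris =>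
      (PySem.List.enumerate tris 0).foldl (fun c ax =>
        (PySem.List.slice tris (some (ax.1 + 1)) none).foldl (fun c y =>
          c.modify (ax.2, y) 0 (fun m => m + 1)) c) c)
      PySem.Dict.empty
  PySem.List.sorted2 ((counts.items.filter (fun pc => pc.2 == 1)).map (fun pc => pc.1))
    (fun p => p.1) (fun p => p.2) false

-- ===== PRECONDITION & SPEC =====
def Spec_build_triangle_graph_edges (triangles : List (List Int)) (adj : List (List Int)) (out : List (Int × Int)) : Prop := out = build_triangle_graph_edges_alt triangles adj
instance (triangles : List (List Int)) (adj : List (List Int)) (out : List (Int × Int)) : Decidable (Spec_build_triangle_graph_edges triangles adj out) := by unfold Spec_build_triangle_graph_edges; infer_instance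

-- ===== CLAIM (what is proved, stated in full; the proofs are below) =====
def Claim_equal_build_triangle_graph_edges : Prop := ∀ (triangles : List (List Int)) (adj : List (List Int)), Dom_build_triangle_graph_edges triangles adj → Spec_build_triangle_graph_edges triangles adj (build_triangle_graph_edges triangles adj)

-- ===== LEMMAS AND PROOFS =====

-- All ordered pairs (earlier element, later element) of a list, in A's scan order.
def ordPairs {α : Type} : List α → List (α × α)
  | [] => []
  | x :: xs => xs.map (fun y => (x, y)) ++ ordPairs xs

-- q is an ordered pair of l iff [q.1, q.2] is a sublist of l
theorem mem_ordPairs {α : Type} (l : List α) (q : α × α) :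
    q ∈ ordPairs l ↔ List.Sublist [q.1, q.2] l := by
  induction l with
  | nil => simp [ordPairs]
  | cons x xs ih =>
    simp only [ordPairs, List.mem_append, List.mem_map, ih]
    constructor
    · rintro (⟨y, hy, rfl⟩ | hs)
      · exact List.cons_sublist_cons.mpr (List.singleton_sublist.mpr hy)
      · exact hs.cons x
    · intro hs
      cases hs with
      | cons _ h => exact Or.inr h
      | cons₂ _ h => exact Or.inl ⟨q.2, List.singleton_sublist.mp h, rfl⟩

theorem pairwise_ordPairs {α : Type} (R : α → α → Prop) (l : List α) (h : l.Pairwise R) :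
    (ordPairs l).Pairwise (fun q1 q2 => R q1.1 q2.1 ∨ (q1.1 = q2.1 ∧ R q1.2 q2.2)) := by
  induction l with
  | nil => simp [ordPairs]
  | cons x xs ih =>
    rcases List.pairwise_cons.mp h with ⟨hx, hxs⟩
    refine List.pairwise_append.mpr ⟨?_, ih hxs, ?_⟩
    · rw [List.pairwise_map]
      exact hxs.imp (fun hr => Or.inr ⟨rfl, hr⟩)
    · intro q1 hq1 q2 hq2
      rcases List.mem_map.mp hq1 with ⟨y, _, rfl⟩
      have h2 := ((mem_ordPairs xs q2).mp hq2).subset (List.mem_cons_self)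
      exact Or.inl (hx _ h2)

theorem pair_sublist_of_mem {α : Type} (R : α → α → Prop)
    (hasym : ∀ a b, R a b → R b a → False)
    (l : List α) (h : l.Pairwise R) (x y : α) (hx : x ∈ l) (hy : y ∈ l) (hxy : R x y) :
    List.Sublist [x, y] l := by
  induction l with
  | nil => simp at hx
  | cons z zs ih =>
    rcases List.pairwise_cons.mp h with ⟨hz, hzs⟩
    rcases List.mem_cons.mp hx with rfl | hx'
    · rcases List.mem_cons.mp hy with rfl | hy'
      · exact absurd hxy (fun hr => hasym _ _ hr hr)
      · exact List.cons_sublist_cons.mpr (List.singleton_sublist.mpr hy')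
    · rcases List.mem_cons.mp hy with rfl | hy'
      · exact absurd (hz _ hx') (fun hr => hasym _ _ hxy hr)
      · exact (ih hzs hx' hy').cons z

theorem count_ordPairs (l : List Int) (h : l.Pairwise (· < ·)) (p : Int × Int) :
    (ordPairs l).count p = if p.1 ∈ l ∧ p.2 ∈ l ∧ p.1 < p.2 then 1 else 0 := by
  induction l with
  | nil => simp [ordPairs]
  | cons x xs ih =>
    rcases List.pairwise_cons.mp h with ⟨hx, hxs⟩
    have hnx : x ∉ xs := fun hm => lt_irrefl x (hx x hm)
    have hnodup : xs.Nodup := hxs.imp (fun hlt => ne_of_lt hlt)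
    rw [ordPairs, List.count_append, ih hxs]
    have hmap : (xs.map (fun y => (x, y))).count p
        = if p.1 = x ∧ p.2 ∈ xs then 1 else 0 := by
      rw [List.count, List.countP_map]
      by_cases h1 : p.1 = x
      · subst h1
        have hfn : ((fun a => a == p) ∘ fun y => (p.1, y)) = fun y => y == p.2 := by
          funext y; simp [Prod.ext_iff]
        rw [hfn]
        by_cases h2 : p.2 ∈ xs
        · have := List.count_eq_one_of_mem hnodup h2
          simp only [h2, and_true, if_pos]
          simpa [List.count] using this
        · have := List.count_eq_zero_of_not_mem h2
          simp only [h2, and_false, if_neg, not_false_iff]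
          simpa [List.count] using this
      · have hz : ∀ y ∈ xs, ¬ (((fun a => a == p) ∘ fun y => (x, y)) y = true) := by
          intro y _ hc
          simp only [Function.comp_apply, beq_iff_eq] at hc
          exact h1 (by rw [← hc])
        simp [List.countP_eq_zero.mpr hz, h1]
    rw [hmap]
    have hiff : ((p.1 = x ∨ p.1 ∈ xs) ∧ (p.2 = x ∨ p.2 ∈ xs) ∧ p.1 < p.2)
        ↔ ((p.1 = x ∧ p.2 ∈ xs) ∨ (p.1 ∈ xs ∧ p.2 ∈ xs ∧ p.1 < p.2)) := by
      constructor
      · rintro ⟨h1 | h1, h2 | h2, h3⟩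
        · exact absurd h3 (by rw [h1, h2]; exact lt_irrefl x)
        · exact Or.inl ⟨h1, h2⟩
        · have := hx _ h1; omega
        · exact Or.inr ⟨h1, h2, h3⟩
      · rintro (⟨h1, h2⟩ | ⟨h1, h2, h3⟩)
        · exact ⟨Or.inl h1, Or.inr h2, h1 ▸ hx _ h2⟩
        · exact ⟨Or.inr h1, Or.inr h2, h3⟩
    simp only [List.mem_cons]
    rw [if_congr hiff rfl rfl]
    by_cases hA : p.1 = x ∧ p.2 ∈ xs <;> by_cases hB : p.1 ∈ xs ∧ p.2 ∈ xs ∧ p.1 < p.2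
    · exact absurd (hA.1 ▸ hB.1) hnx
    · rw [if_pos hA, if_neg hB, if_pos (Or.inl hA)]
    · rw [if_neg hA, if_pos hB, if_pos (Or.inr hB)]
    · rw [if_neg hA, if_neg hB, if_neg (by tauto)]

-- A's nested loop (enumerate + slice of the same list) visits exactly the ordered pairs
theorem loopA {α σ : Type} (f : σ → (Int × α) → (Int × α) → σ) (full : List α) :
    ∀ (m k : Nat) (s : σ), full.length - k = m →
    (PySem.List.enumerate (full.drop k) (k : Int)).foldl
      (fun acc it => (PySem.List.enumerate (PySem.List.slice full (some (it.1 + 1)) none) (it.1 + 1)).foldl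
        (fun a jt => f a it jt) acc) s
    = (ordPairs (PySem.List.enumerate (full.drop k) (k : Int))).foldl (fun a q => f a q.1 q.2) s := by
  intro m
  induction m with
  | zero =>
    intro k s hk
    have hdrop : full.drop k = [] := List.drop_eq_nil_iff.mpr (by omega)
    simp [hdrop, PySem.List.enumerate_nil, ordPairs]
  | succ m ih =>
    intro k s hk
    cases hdrop : full.drop k with
    | nil => simp [PySem.List.enumerate_nil, ordPairs]
    | cons x rest =>
      have hklt : k < full.length := by
        by_contra hge
        rw [List.drop_eq_nil_iff.mpr (by omega)] at hdrop
        simp at hdrop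
      have hrest : full.drop (k + 1) = rest := by
        rw [← List.tail_drop, hdrop, List.tail_cons]
      have hcast : (k : Int) + 1 = ((k + 1 : Nat) : Int) := by push_cast; ring
      rw [PySem.List.enumerate_cons, List.foldl_cons]
      have hslice : PySem.List.slice full (some ((k : Int) + 1)) none = rest := by
        rw [hcast, PySem.List.slice_from_natCast, hrest]
      rw [hslice, show ((k:Int)+1) = ((k+1:Nat):Int) from hcast, ← hrest]
      rw [ih (k + 1) _ (by omega)]
      rw [hrest, ordPairs, List.foldl_append, List.foldl_map]

-- B's inner pair loop (enumerate + element slice of the same list) visits the ordered pairs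
theorem loopB {σ : Type} (h : σ → Int → Int → σ) (full : List Int) :
    ∀ (m k : Nat) (s : σ), full.length - k = m →
    (PySem.List.enumerate (full.drop k) (k : Int)).foldl
      (fun c ax => (PySem.List.slice full (some (ax.1 + 1)) none).foldl
        (fun c y => h c ax.2 y) c) s
    = (ordPairs (full.drop k)).foldl (fun c q => h c q.1 q.2) s := by
  intro m
  induction m with
  | zero =>
    intro k s hk
    have hdrop : full.drop k = [] := List.drop_eq_nil_iff.mpr (by omega)
    simp [hdrop, PySem.List.enumerate_nil, ordPairs]
  | succ m ih =>
    intro k s hk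
    cases hdrop : full.drop k with
    | nil => simp [PySem.List.enumerate_nil, ordPairs]
    | cons x rest =>
      have hklt : k < full.length := by
        by_contra hge
        rw [List.drop_eq_nil_iff.mpr (by omega)] at hdrop
        simp at hdrop
      have hrest : full.drop (k + 1) = rest := by
        rw [← List.tail_drop, hdrop, List.tail_cons]
      have hcast : (k : Int) + 1 = ((k + 1 : Nat) : Int) := by push_cast; ring
      rw [PySem.List.enumerate_cons, List.foldl_cons]
      have hslice : PySem.List.slice full (some ((k : Int) + 1)) none = rest := by
        rw [hcast, PySem.List.slice_from_natCast, hrest]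
      rw [hslice, show ((k:Int)+1) = ((k+1:Nat):Int) from hcast, ← hrest]
      rw [ih (k + 1) _ (by omega)]
      rw [hrest, ordPairs, List.foldl_append, List.foldl_map]

-- Proof-side abbreviations for B's data structures
def Epairs (triangles : List (List Int)) : List (Int × List Int) := PySem.List.enumerate triangles 0

def LviL (triangles : List (List Int)) : List (Int × Int) :=
  (Epairs triangles).flatMap (fun it => (PySem.Set.ofList it.2).map (fun v => (v, it.1)))

def occL (triangles : List (List Int)) (v : Int) : List Int :=
  ((Epairs triangles).filter (fun it => decide (v ∈ PySem.Set.ofList it.2))).map (fun it => it.1)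

def keysIL (triangles : List (List Int)) : List Int :=
  PySem.Set.ofList ((LviL triangles).map (fun p => p.1))

def LpL (triangles : List (List Int)) : List (Int × Int) :=
  (keysIL triangles).flatMap (fun v => ordPairs (occL triangles v))

def sharedLen (t1 t2 : List Int) : Nat :=
  (PySem.Set.inter (PySem.Set.ofList t1) (PySem.Set.ofList t2)).length

def lexlt (p q : Int × Int) : Prop := p.1 < q.1 ∨ (p.1 = q.1 ∧ p.2 < q.2)

-- small list facts
theorem filter_beq_of_nodup (l : List Int) (hl : l.Nodup) (v : Int) :
    l.filter (fun u => u == v) = if v ∈ l then [v] else [] := by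
  induction l with
  | nil => simp
  | cons x xs ih =>
    rcases List.nodup_cons.mp hl with ⟨hx, hxs⟩
    by_cases hxv : x = v
    · subst hxv
      simp [ih hxs, hx]
    · simp [hxv, ih hxs, Ne.symm hxv]

theorem flatMap_if_singleton {α β : Type} (l : List α) (P : α → Bool) (g : α → β) :
    (l.flatMap (fun x => if P x then [g x] else [])) = (l.filter P).map g := by
  induction l with
  | nil => simp
  | cons x xs ih =>
    by_cases hp : P x <;> simp [hp, ih]

theorem sum_map_ite_nat {α : Type} (l : List α) (P : α → Prop) [DecidablePred P] :
    (l.map (fun v => if P v then (1 : Nat) else 0)).sum = l.countP (fun v => decide (P v)) := by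
  induction l with
  | nil => simp
  | cons x xs ih =>
    by_cases hp : P x
    · simp [hp, ih]
      omega
    · simp [hp, ih]

-- the index dict built by B
theorem index_getD (triangles : List (List Int)) (v : Int) :
    ((PySem.List.enumerate triangles 0).foldl (fun d it =>
      (PySem.Set.ofList it.2).foldl (fun d v => d.modify v [] (fun l => l ++ [it.1])) d)
      PySem.Dict.empty).getD v [] = occL triangles v := by
  have hfold : ((PySem.List.enumerate triangles 0).foldl (fun d it =>
      (PySem.Set.ofList it.2).foldl (fun d v => d.modify v [] (fun l => l ++ [it.1])) d)
      (PySem.Dict.empty : PySem.Dict Int (List Int)))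
      = (LviL triangles).foldl (fun d p => d.modify p.1 [] (fun l => l ++ [p.2])) PySem.Dict.empty := by
    rw [LviL, List.foldl_flatMap]
    simp only [List.foldl_map, Epairs]
  rw [hfold, PySem.Dict.getD_foldl_modify_append]
  rw [show (PySem.Dict.empty : PySem.Dict Int (List Int)).getD v [] = [] from rfl, List.nil_append]
  unfold LviL occL
  rw [List.filter_flatMap, List.map_flatMap]
  have hinner : ∀ it : Int × List Int,
      ((( PySem.Set.ofList it.2).map (fun u => (u, it.1))).filter (fun p => p.1 == v)).map (fun x => x.2)
      = if decide (v ∈ PySem.Set.ofList it.2) then [it.1] else [] := by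
    intro it
    rw [List.filter_map]
    have hc : ((fun p : Int × Int => p.1 == v) ∘ fun u => (u, it.1)) = fun u => u == v := by
      funext u; rfl
    rw [hc, filter_beq_of_nodup _ (PySem.Set.nodup_ofList it.2) v]
    by_cases hv : v ∈ PySem.Set.ofList it.2 <;> simp [hv]
  simp only [hinner]
  exact flatMap_if_singleton _ _ _

theorem index_keys (triangles : List (List Int)) :
    ((PySem.List.enumerate triangles 0).foldl (fun d it =>
      (PySem.Set.ofList it.2).foldl (fun d v => d.modify v [] (fun l => l ++ [it.1])) d)
      PySem.Dict.empty).keys = keysIL triangles := by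
  have hfold : ((PySem.List.enumerate triangles 0).foldl (fun d it =>
      (PySem.Set.ofList it.2).foldl (fun d v => d.modify v [] (fun l => l ++ [it.1])) d)
      (PySem.Dict.empty : PySem.Dict Int (List Int)))
      = (LviL triangles).foldl (fun d p => d.modify p.1 [] (fun l => l ++ [p.2])) PySem.Dict.empty := by
    rw [LviL, List.foldl_flatMap]
    simp only [List.foldl_map, Epairs]
  rw [hfold, PySem.Dict.keys_foldl_modify_key (LviL triangles) (fun p => p.1) [] (fun _ _ l => l ++ [_ ])]
  rw [show (PySem.Dict.empty : PySem.Dict Int (List Int)).keys = [] from rfl]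
  rw [keysIL, PySem.Set.ofList_eq_foldl]
  rfl

theorem index_values (triangles : List (List Int)) :
    ((PySem.List.enumerate triangles 0).foldl (fun d it =>
      (PySem.Set.ofList it.2).foldl (fun d v => d.modify v [] (fun l => l ++ [it.1])) d)
      PySem.Dict.empty).values = (keysIL triangles).map (occL triangles) := by
  have hnd : ((PySem.List.enumerate triangles 0).foldl (fun d it =>
      (PySem.Set.ofList it.2).foldl (fun d v => d.modify v [] (fun l => l ++ [it.1])) d)
      (PySem.Dict.empty : PySem.Dict Int (List Int))).keys.Nodup := by
    rw [index_keys]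
    exact PySem.Set.nodup_ofList _
  rw [PySem.Dict.values, PySem.Dict.items_eq_map_keys _ hnd [], List.map_map]
  rw [index_keys]
  refine List.map_congr_left (fun k _ => ?_)
  simp only [Function.comp_apply]
  exact index_getD triangles k

theorem occ_pairwise (triangles : List (List Int)) (v : Int) :
    (occL triangles v).Pairwise (· < ·) := by
  unfold occL
  rw [List.pairwise_map]
  exact (PySem.List.pairwise_lt_enumerate triangles 0).filter _

theorem mem_occ (triangles : List (List Int)) (v i : Int) :
    i ∈ occL triangles v ↔ ∃ (k : Nat) (hk : k < triangles.length), i = (k : Int) ∧ v ∈ triangles[k] := by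
  unfold occL Epairs
  rw [List.mem_map]
  constructor
  · rintro ⟨it, hit, rfl⟩
    rcases List.mem_filter.mp hit with ⟨hmem, hdec⟩
    rcases (PySem.List.mem_enumerate_iff _ _ _).mp hmem with ⟨k, hk, rfl⟩
    refine ⟨k, hk, by simp, ?_⟩
    have hv := of_decide_eq_true hdec
    rwa [PySem.Set.mem_ofList] at hv
  · rintro ⟨k, hk, rfl, hv⟩
    refine ⟨(0 + (k : Int), triangles[k]), List.mem_filter.mpr ⟨?_, ?_⟩, by simp⟩
    · exact (PySem.List.mem_enumerate_iff _ _ _).mpr ⟨k, hk, rfl⟩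
    · exact decide_eq_true ((PySem.Set.mem_ofList _ _).mpr hv)

theorem mem_keysI (triangles : List (List Int)) (v : Int) :
    v ∈ keysIL triangles ↔ ∃ (k : Nat) (hk : k < triangles.length), v ∈ triangles[k] := by
  unfold keysIL LviL Epairs
  rw [PySem.Set.mem_ofList, List.mem_map]
  constructor
  · rintro ⟨q, hq, rfl⟩
    rcases List.mem_flatMap.mp hq with ⟨it, hit, hq2⟩
    rcases (PySem.List.mem_enumerate_iff _ _ _).mp hit with ⟨k, hk, rfl⟩
    rcases List.mem_map.mp hq2 with ⟨u, hu, rfl⟩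
    exact ⟨k, hk, (PySem.Set.mem_ofList _ _).mp hu⟩
  · rintro ⟨k, hk, hv⟩
    refine ⟨(v, (0 + (k : Int), triangles[k]).1), List.mem_flatMap.mpr ⟨(0 + (k : Int), triangles[k]), ?_, ?_⟩, rfl⟩
    · exact (PySem.List.mem_enumerate_iff _ _ _).mpr ⟨k, hk, rfl⟩
    · exact List.mem_map.mpr ⟨v, (PySem.Set.mem_ofList _ _).mpr hv, rfl⟩

theorem count_Lp_eq_shared (triangles : List (List Int)) (a b : Nat)
    (ha : a < triangles.length) (hb : b < triangles.length) (hab : a < b) :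
    (LpL triangles).count ((a : Int), (b : Int)) = sharedLen triangles[a] triangles[b] := by
  rw [LpL, List.count_flatMap]
  have hterm : ∀ v ∈ keysIL triangles,
      (List.count ((a : Int), (b : Int)) ∘ fun v => ordPairs (occL triangles v)) v
      = if v ∈ triangles[a] ∧ v ∈ triangles[b] then 1 else 0 := by
    intro v _
    simp only [Function.comp_apply]
    rw [count_ordPairs _ (occ_pairwise triangles v)]
    have hma : ((a : Int) ∈ occL triangles v) ↔ v ∈ triangles[a] := by
      rw [mem_occ]
      constructor
      · rintro ⟨k, hk, hak, hv⟩
        obtain rfl : k = a := by exact_mod_cast hak.symm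
        exact hv
      · intro hv; exact ⟨a, ha, rfl, hv⟩
    have hmb : ((b : Int) ∈ occL triangles v) ↔ v ∈ triangles[b] := by
      rw [mem_occ]
      constructor
      · rintro ⟨k, hk, hbk, hv⟩
        obtain rfl : k = b := by exact_mod_cast hbk.symm
        exact hv
      · intro hv; exact ⟨b, hb, rfl, hv⟩
    have hlt : ((a : Int)) < ((b : Int)) := by exact_mod_cast hab
    by_cases hc : v ∈ triangles[a] ∧ v ∈ triangles[b]
    · rw [if_pos ⟨hma.mpr hc.1, hmb.mpr hc.2, hlt⟩, if_pos hc]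
    · rw [if_neg (fun hC => hc ⟨hma.mp hC.1, hmb.mp hC.2.1⟩), if_neg hc]
  rw [List.map_congr_left hterm, sum_map_ite_nat, List.countP_eq_length_filter]
  unfold sharedLen PySem.Set.inter
  have hperm : ((keysIL triangles).filter (fun v => decide (v ∈ triangles[a] ∧ v ∈ triangles[b]))).Perm
      ((PySem.Set.ofList triangles[a]).filter (fun x => PySem.Set.contains (PySem.Set.ofList triangles[b]) x)) := by
    refine (List.perm_ext_iff_of_nodup ((PySem.Set.nodup_ofList _).filter _)
      ((PySem.Set.nodup_ofList _).filter _)).mpr ?_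
    intro x
    simp only [List.mem_filter, decide_eq_true_eq, PySem.Set.contains_iff, PySem.Set.mem_ofList]
    constructor
    · rintro ⟨_, hx1, hx2⟩; exact ⟨hx1, hx2⟩
    · rintro ⟨hx1, hx2⟩
      have hx : x ∈ keysIL triangles := (mem_keysI triangles x).mpr ⟨a, ha, hx1⟩
      exact ⟨(PySem.Set.mem_ofList _ _).mp hx, hx1, hx2⟩
  exact hperm.length_eq

theorem mem_Lp_iff (triangles : List (List Int)) (p : Int × Int) :
    ((LpL triangles).count p = 1) ↔
      ∃ (a b : Nat) (hab : a < b) (hb : b < triangles.length),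
        p = ((a : Int), (b : Int)) ∧ sharedLen (triangles[a]'(lt_trans hab hb)) (triangles[b]'hb) = 1 := by
  constructor
  · intro hc
    have hmem : p ∈ LpL triangles := List.count_pos_iff.mp (by omega)
    rcases List.mem_flatMap.mp hmem with ⟨v, _, hp⟩
    have hsub := (mem_ordPairs _ p).mp hp
    have hpw : List.Pairwise (· < ·) [p.1, p.2] := List.Pairwise.sublist hsub (occ_pairwise triangles v)
    have hlt : p.1 < p.2 := by
      rcases List.pairwise_cons.mp hpw with ⟨h1, _⟩
      exact h1 p.2 List.mem_cons_self
    have hp1 : p.1 ∈ occL triangles v := hsub.subset List.mem_cons_self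
    have hp2 : p.2 ∈ occL triangles v := hsub.subset (by simp)
    rcases (mem_occ triangles v p.1).mp hp1 with ⟨x, hx, he1, _⟩
    rcases (mem_occ triangles v p.2).mp hp2 with ⟨y, hy, he2, _⟩
    have hxy : x < y := by rw [he1, he2] at hlt; exact_mod_cast hlt
    obtain rfl : p = ((x : Int), (y : Int)) := Prod.ext_iff.mpr ⟨he1, he2⟩
    refine ⟨x, y, hxy, hy, rfl, ?_⟩
    rw [count_Lp_eq_shared triangles x y hx hy hxy] at hc
    exact hc
  · rintro ⟨a, b, hab, hb, rfl, hs⟩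
    rw [count_Lp_eq_shared triangles a b (lt_trans hab hb) hb hab]
    exact hs

-- Python's tuple-lexicographic sort order on Int pairs
def lt2 (p q : Int × Int) : Bool :=
  decide (p.1 < q.1) || (!decide (q.1 < p.1) && decide (p.2 < q.2))

theorem lt2_eq_true_iff (p q : Int × Int) :
    lt2 p q = true ↔ (p.1 < q.1 ∨ (¬ q.1 < p.1 ∧ p.2 < q.2)) := by
  simp [lt2]

theorem lt2_eq_false_iff (p q : Int × Int) :
    lt2 p q = false ↔ ¬ (p.1 < q.1 ∨ (¬ q.1 < p.1 ∧ p.2 < q.2)) := by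
  rw [← Bool.not_eq_true, lt2_eq_true_iff]

theorem lt2_asymm (a b : Int × Int) (h : lt2 a b = true) : lt2 b a = false := by
  rw [lt2_eq_true_iff] at h
  rw [lt2_eq_false_iff]
  omega

theorem lt2_cross (x y z : Int × Int) (h1 : lt2 x y = true) (h2 : lt2 z y = false) :
    lt2 z x = false := by
  rw [lt2_eq_true_iff] at h1
  rw [lt2_eq_false_iff] at h2 ⊢
  omega

theorem lt2_antisymm (a b : Int × Int) (h1 : lt2 a b = false) (h2 : lt2 b a = false) : a = b := by
  rw [lt2_eq_false_iff] at h1 h2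
  have : a.1 = b.1 ∧ a.2 = b.2 := by omega
  exact Prod.ext_iff.mpr this

theorem lt2_of_lexlt (a b : Int × Int) (h : lexlt a b) : lt2 b a = false := by
  rw [lexlt] at h
  rw [lt2_eq_false_iff]
  omega

theorem pairwise_insertBy (x : Int × Int) (acc : List (Int × Int))
    (h : acc.Pairwise (fun p q => lt2 q p = false)) :
    (PySem.List.insertBy lt2 x acc).Pairwise (fun p q => lt2 q p = false) := by
  induction acc with
  | nil => simp [PySem.List.insertBy]
  | cons y ys ih =>
    rcases List.pairwise_cons.mp h with ⟨hy, hys⟩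
    by_cases hb : lt2 x y = true
    · rw [show PySem.List.insertBy lt2 x (y :: ys) = x :: y :: ys by simp [PySem.List.insertBy, hb]]
      refine List.pairwise_cons.mpr ⟨?_, h⟩
      intro z hz
      rcases List.mem_cons.mp hz with rfl | hz'
      · exact lt2_asymm _ _ hb
      · exact lt2_cross x y z hb (hy z hz')
    · rw [show PySem.List.insertBy lt2 x (y :: ys) = y :: PySem.List.insertBy lt2 x ys by
        simp [PySem.List.insertBy, hb]]
      refine List.pairwise_cons.mpr ⟨?_, ih hys⟩
      intro z hz
      rcases (PySem.List.mem_insertBy lt2 x z ys).mp hz with rfl | hz'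
      · exact Bool.not_eq_true _ ▸ (Bool.eq_false_iff.mpr hb)
      · exact hy z hz'

theorem pairwise_sorted2_aux (xs : List (Int × Int)) :
    ∀ acc : List (Int × Int), acc.Pairwise (fun p q => lt2 q p = false) →
    (xs.foldl (fun acc x => PySem.List.insertBy lt2 x acc) acc).Pairwise (fun p q => lt2 q p = false) := by
  induction xs with
  | nil => intro acc h; exact h
  | cons x xs ih => intro acc h; exact ih _ (pairwise_insertBy x acc h)

theorem sorted2_eq_of_perm_of_pairwise_lexlt (xs ys : List (Int × Int))
    (hperm : ys.Perm xs) (hys : ys.Pairwise lexlt) :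
    PySem.List.sorted2 xs (fun p => p.1) (fun p => p.2) false = ys := by
  have hfold : PySem.List.sorted2 xs (fun p => p.1) (fun p => p.2) false
      = xs.foldl (fun acc x => PySem.List.insertBy lt2 x acc) [] := rfl
  refine List.Perm.eq_of_pairwise (le := fun p q => lt2 q p = false)
    (fun a b _ _ hab hba => lt2_antisymm _ _ hba hab) ?_ ?_ ?_
  · rw [hfold]; exact pairwise_sorted2_aux xs [] (by simp)
  · exact hys.imp (fun h => lt2_of_lexlt _ _ h)
  · exact (PySem.List.sorted2_perm xs _ _ false).trans hperm.symm

-- A's output in filter/map form, and its characterizations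
def condA (q : (Int × List Int) × (Int × List Int)) : Bool :=
  decide (PySem.Set.len (PySem.Set.inter (PySem.Set.ofList q.1.2) (PySem.Set.ofList q.2.2)) = 1)

def Aform (triangles : List (List Int)) : List (Int × Int) :=
  ((ordPairs (Epairs triangles)).filter condA).map (fun q => (q.1.1, q.2.1))

theorem condA_proj (q : (Int × List Int) × (Int × List Int)) :
    condA q = true ↔ sharedLen q.1.2 q.2.2 = 1 := by
  simp only [condA, decide_eq_true_eq, PySem.Set.len, sharedLen]
  exact_mod_cast Iff.rfl

theorem mem_Aform (triangles : List (List Int)) (p : Int × Int) :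
    p ∈ Aform triangles ↔
      ∃ (a b : Nat) (hab : a < b) (hb : b < triangles.length),
        p = ((a : Int), (b : Int)) ∧ sharedLen (triangles[a]'(lt_trans hab hb)) (triangles[b]'hb) = 1 := by
  unfold Aform
  rw [List.mem_map]
  constructor
  · rintro ⟨q, hq, rfl⟩
    rcases List.mem_filter.mp hq with ⟨hqo, hcond⟩
    have hsub := (mem_ordPairs _ q).mp hqo
    have hpw : List.Pairwise (fun u v : Int × List Int => u.1 < v.1) [q.1, q.2] :=
      List.Pairwise.sublist hsub (PySem.List.pairwise_lt_enumerate triangles 0)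
    have hlt : q.1.1 < q.2.1 := by
      rcases List.pairwise_cons.mp hpw with ⟨h1, _⟩
      exact h1 q.2 List.mem_cons_self
    have hm1 : q.1 ∈ Epairs triangles := hsub.subset List.mem_cons_self
    have hm2 : q.2 ∈ Epairs triangles := hsub.subset (by simp)
    rcases (PySem.List.mem_enumerate_iff _ _ _).mp hm1 with ⟨a, ha, he1⟩
    rcases (PySem.List.mem_enumerate_iff _ _ _).mp hm2 with ⟨b, hb, he2⟩
    have hab : a < b := by
      rw [he1, he2] at hlt
      simp only [zero_add] at hlt
      exact_mod_cast hlt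
    refine ⟨a, b, hab, hb, ?_, ?_⟩
    · rw [he1, he2]; simp
    · have hc := (condA_proj q).mp hcond
      rw [he1, he2] at hc
      exact hc
  · rintro ⟨a, b, hab, hb, rfl, hs⟩
    have ha : a < triangles.length := lt_trans hab hb
    refine ⟨((0 + (a : Int), triangles[a]), (0 + (b : Int), triangles[b])), ?_, by simp⟩
    rw [List.mem_filter]
    constructor
    · rw [mem_ordPairs]
      refine pair_sublist_of_mem (fun u v : Int × List Int => u.1 < v.1)
        (fun u v h1 h2 => absurd h2 (not_lt.mpr (le_of_lt h1))) _
        (PySem.List.pairwise_lt_enumerate triangles 0) _ _ ?_ ?_ ?_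
      · exact (PySem.List.mem_enumerate_iff _ _ _).mpr ⟨a, ha, rfl⟩
      · exact (PySem.List.mem_enumerate_iff _ _ _).mpr ⟨b, hb, rfl⟩
      · simp only [zero_add]; exact_mod_cast hab
    · exact (condA_proj _).mpr hs

theorem pairwise_lexlt_Aform (triangles : List (List Int)) :
    (Aform triangles).Pairwise lexlt := by
  unfold Aform
  rw [List.pairwise_map]
  refine List.Pairwise.imp ?_ ((pairwise_ordPairs (fun u v : Int × List Int => u.1 < v.1) _
    (PySem.List.pairwise_lt_enumerate triangles 0)).filter condA)
  rintro q1 q2 (h | ⟨heq, h⟩)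
  · exact Or.inl h
  · exact Or.inr ⟨by rw [heq], h⟩

theorem nodup_Aform (triangles : List (List Int)) : (Aform triangles).Nodup := by
  refine (pairwise_lexlt_Aform triangles).imp ?_
  rintro a b (h | ⟨_, h⟩) rfl
  · exact lt_irrefl _ h
  · exact lt_irrefl _ h

-- ===== VERDICT (by name: the statement is the Claim_ definition above) =====
theorem build_triangle_graph_edges_spec : Claim_equal_build_triangle_graph_edges := by
  intro triangles adj _
  unfold Spec_build_triangle_graph_edges
  -- A in filter/map form
  have hA : build_triangle_graph_edges triangles adj = Aform triangles := by
    have h1 := loopA (f := fun a (it jt : Int × List Int) =>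
        if PySem.Set.len (PySem.Set.inter (PySem.Set.ofList it.2) (PySem.Set.ofList jt.2)) = 1
        then a ++ [(it.1, jt.1)] else a) triangles triangles.length 0 [] (by omega)
    simp only [List.drop_zero, Nat.cast_zero] at h1
    have hfun : (fun (a : List (Int × Int)) (q : (Int × List Int) × (Int × List Int)) =>
        if PySem.Set.len (PySem.Set.inter (PySem.Set.ofList q.1.2) (PySem.Set.ofList q.2.2)) = 1
        then a ++ [(q.1.1, q.2.1)] else a)
        = (fun a q => if condA q = true then a ++ [(fun q : (Int × List Int) × (Int × List Int) => (q.1.1, q.2.1)) q] else a) := by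
      funext a q
      simp only [condA, decide_eq_true_eq]
    have h2 : (ordPairs (PySem.List.enumerate triangles 0)).foldl
        (fun a q => if PySem.Set.len (PySem.Set.inter (PySem.Set.ofList q.1.2) (PySem.Set.ofList q.2.2)) = 1
          then a ++ [(q.1.1, q.2.1)] else a) []
        = Aform triangles := by
      rw [hfun, PySem.List.foldl_append_if, List.nil_append]
      rfl
    exact h1.trans h2
  -- B as a sort of the count-1 keys
  have hB : build_triangle_graph_edges_alt triangles adj
      = PySem.List.sorted2
          ((PySem.Set.ofList (LpL triangles)).filter
            (fun k => ((List.count k (LpL triangles) : Int)) == 1))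
          (fun p => p.1) (fun p => p.2) false := by
    unfold build_triangle_graph_edges_alt
    dsimp only
    have hcounts : (((PySem.List.enumerate triangles 0).foldl (fun d it =>
        (PySem.Set.ofList it.2).foldl (fun d v => d.modify v [] (fun l => l ++ [it.1])) d)
        PySem.Dict.empty).values).foldl (fun c tris =>
          (PySem.List.enumerate tris 0).foldl (fun c ax =>
            (PySem.List.slice tris (some (ax.1 + 1)) none).foldl (fun c y =>
              c.modify (ax.2, y) 0 (fun m => m + 1)) c) c)
          PySem.Dict.empty
        = PySem.Dict.counter (LpL triangles) := by
      rw [index_values]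
      have hbody : (fun (c : PySem.Dict (Int × Int) Int) (tris : List Int) =>
          (PySem.List.enumerate tris 0).foldl (fun c ax =>
            (PySem.List.slice tris (some (ax.1 + 1)) none).foldl (fun c y =>
              c.modify (ax.2, y) 0 (fun m => m + 1)) c) c)
          = (fun c tris => (ordPairs tris).foldl (fun c q => c.modify q 0 (fun m => m + 1)) c) := by
        funext c tris
        have h := loopB (h := fun c x y => c.modify (x, y) 0 (fun m => m + 1)) tris tris.length 0 c (by omega)
        simp only [List.drop_zero, Nat.cast_zero] at h
        rw [h]
      rw [hbody, ← List.foldl_flatMap, List.flatMap_map]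
      rw [PySem.Dict.counter.eq_1]
      rfl
    rw [hcounts, PySem.Dict.items_counter, List.filter_map, List.map_map]
    simp only [Function.comp_def, List.map_id']
  rw [hA, hB]
  -- the two lists are permutations with the same strict order
  refine (sorted2_eq_of_perm_of_pairwise_lexlt _ _ ?_ (pairwise_lexlt_Aform triangles)).symm
  refine (List.perm_ext_iff_of_nodup (nodup_Aform triangles)
    ((PySem.Set.nodup_ofList _).filter _)).mpr ?_
  intro p
  rw [mem_Aform, List.mem_filter]
  constructor
  · intro h
    have hc := (mem_Lp_iff triangles p).mpr h
    refine ⟨(PySem.Set.mem_ofList _ _).mpr (List.count_pos_iff.mp (by omega)), ?_⟩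
    rw [beq_iff_eq]
    exact_mod_cast hc
  · rintro ⟨hmem, hcnt⟩
    rw [beq_iff_eq] at hcnt
    have hc : (LpL triangles).count p = 1 := by exact_mod_cast hcnt
    exact (mem_Lp_iff triangles p).mp hc
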